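-- pv_equiv track=rewrite | github.com/SimplyLiz/PIXL | training/prepare_eotb_optimal.py | augment_grid
-- ===== SOURCE A (Python) =====
-- def rotate_90(grid):
--     h = len(grid)
--     return [[grid[h - 1 - x][y] for x in range(h)] for y in range(len(grid[0]))]
--
-- def augment_grid(grid, aug_level: int = 4):
--     """Augment a grid. aug_level=4: rotations only. aug_level=8: + flips."""
--     r90 = rotate_90(grid)
--     r180 = rotate_90(r90)
--     r270 = rotate_90(r180)
--     variants = [
--         (grid, "orig"), (r90, "r90"), (r180, "r180"), (r270, "r270"),
--     ]
--     if aug_level >= 8: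
--         flipped = [row[::-1] for row in grid]
--         fr90 = rotate_90(flipped)
--         fr180 = rotate_90(fr90)
--         fr270 = rotate_90(fr180)
--         variants.extend([
--             (flipped, "flip"), (fr90, "flip_r90"), (fr180, "flip_r180"), (fr270, "flip_r270"),
--         ])
--     return variants
-- ===== SOURCE B (Python) =====
-- def _rot90(x, h, w):
--     return [[x[h - 1 - i][y] for i in range(h)] for y in range(w)]
--
-- def _rot180(x, h, w):
--     return [[x[h - 1 - i][w - 1 - j] for j in range(w)] for i in range(h)]
--
-- def _rot270(x, h, w):
--     return [[x[i][w - 1 - y] for i in range(h)] for y in range(w)]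
--
-- def augment_grid(grid, aug_level: int = 4):
--     """Augment a grid. aug_level=4: rotations only. aug_level=8: + flips."""
--     h = len(grid)
--     w = len(grid[0])
--     variants = [
--         (grid, "orig"),
--         (_rot90(grid, h, w), "r90"),
--         (_rot180(grid, h, w), "r180"),
--         (_rot270(grid, h, w), "r270"),
--     ]
--     if aug_level >= 8:
--         flipped = [row[::-1] for row in grid]
--         variants += [
--             (flipped, "flip"),
--             (_rot90(flipped, h, w), "flip_r90"),
--             (_rot180(flipped, h, w), "flip_r180"),
--             (_rot270(flipped, h, w), "flip_r270"),
--         ]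
--     return variants
-- ===== Notes on version B (the rewrite author's own statement) =====
-- stated objective: alternative
-- what changed: Each rotation variant is computed independently from the (possibly flipped) grid by its own closed index formula r90[y][x]=x[h-1-x'][y], r180[i][j]=x[h-1-i][w-1-j], r270[y][x']=x[x'][w-1-y], instead of chaining rotate_90 three times and reusing intermediate rotations.
import Mathlib
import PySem

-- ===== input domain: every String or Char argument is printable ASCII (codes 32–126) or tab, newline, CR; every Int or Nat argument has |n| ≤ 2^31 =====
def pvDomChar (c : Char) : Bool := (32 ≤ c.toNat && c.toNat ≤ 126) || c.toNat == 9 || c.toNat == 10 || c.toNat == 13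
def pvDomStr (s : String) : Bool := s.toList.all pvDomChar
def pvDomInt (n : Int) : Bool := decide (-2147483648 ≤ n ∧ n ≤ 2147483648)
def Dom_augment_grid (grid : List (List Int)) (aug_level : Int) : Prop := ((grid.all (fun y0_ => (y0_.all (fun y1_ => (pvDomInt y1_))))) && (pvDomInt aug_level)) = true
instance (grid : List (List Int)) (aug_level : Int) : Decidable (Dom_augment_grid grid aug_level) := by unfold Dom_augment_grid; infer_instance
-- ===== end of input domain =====

-- B computes each rotated/flipped variant independently by its own closed index formula
-- instead of chaining rotate_90; same cost (objective: alternative).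

-- ===== PORT A =====
-- rotate_90: list accesses grid[h-1-x][y] are ported with getD; inside Pre_ every access
-- is in range, so getD is exact there (Python raises IndexError outside, excluded by Pre_).
def rotate90 (g : List (List Int)) : List (List Int) :=
  let h := g.length
  (List.range ((g.getD 0 []).length)).map (fun y =>
    (List.range h).map (fun x => (g.getD (h - 1 - x) []).getD y 0))

def augment_grid (grid : List (List Int)) (aug_level : Int) : List (List (List Int) × String) :=
  let r90 := rotate90 grid
  let r180 := rotate90 r90
  let r270 := rotate90 r180
  let variants : List (List (List Int) × String) :=
    [(grid, "orig"), (r90, "r90"), (r180, "r180"), (r270, "r270")]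
  if 8 ≤ aug_level then
    let flipped := grid.map List.reverse   -- row[::-1] is List.reverse, exact
    let fr90 := rotate90 flipped
    let fr180 := rotate90 fr90
    let fr270 := rotate90 fr180
    variants ++ [(flipped, "flip"), (fr90, "flip_r90"), (fr180, "flip_r180"), (fr270, "flip_r270")]
  else variants

-- ===== PORT B =====
def bRot90 (x : List (List Int)) (h w : Nat) : List (List Int) :=
  (List.range w).map (fun y => (List.range h).map (fun i => (x.getD (h - 1 - i) []).getD y 0))

def bRot180 (x : List (List Int)) (h w : Nat) : List (List Int) :=
  (List.range h).map (fun i => (List.range w).map (fun j => (x.getD (h - 1 - i) []).getD (w - 1 - j) 0))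

def bRot270 (x : List (List Int)) (h w : Nat) : List (List Int) :=
  (List.range w).map (fun y => (List.range h).map (fun i => (x.getD i []).getD (w - 1 - y) 0))

def augment_grid_alt (grid : List (List Int)) (aug_level : Int) : List (List (List Int) × String) :=
  let h := grid.length
  let w := (grid.getD 0 []).length
  let variants : List (List (List Int) × String) :=
    [(grid, "orig"), (bRot90 grid h w, "r90"), (bRot180 grid h w, "r180"), (bRot270 grid h w, "r270")]
  if 8 ≤ aug_level then
    let flipped := grid.map List.reverse
    variants ++ [(flipped, "flip"), (bRot90 flipped h w, "flip_r90"),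
                 (bRot180 flipped h w, "flip_r180"), (bRot270 flipped h w, "flip_r270")]
  else variants

-- ===== PRECONDITION & SPEC =====
-- A raises IndexError exactly on the empty grid, a grid whose first row is empty, and grids
-- with some row shorter than the first row; Pre_ admits every input on which A returns.
def Pre_augment_grid (grid : List (List Int)) (_aug_level : Int) : Prop :=
  grid ≠ [] ∧ grid.getD 0 [] ≠ [] ∧ ∀ row ∈ grid, (grid.getD 0 []).length ≤ row.length

instance (grid : List (List Int)) (aug_level : Int) : Decidable (Pre_augment_grid grid aug_level) := by
  unfold Pre_augment_grid; infer_instance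

def pvWitness_augment_grid : List (List Int) × Int := ([[1, 2], [3, 4]], 8)

def Spec_augment_grid (grid : List (List Int)) (aug_level : Int) (out : List (List (List Int) × String)) : Prop := out = augment_grid_alt grid aug_level
instance (grid : List (List Int)) (aug_level : Int) (out : List (List (List Int) × String)) : Decidable (Spec_augment_grid grid aug_level out) := by unfold Spec_augment_grid; infer_instance

-- ===== CLAIM (what is proved, stated in full; the proofs are below) =====
def Claim_equal_augment_grid : Prop := ∀ (grid : List (List Int)) (aug_level : Int), Dom_augment_grid grid aug_level → Pre_augment_grid grid aug_level → Spec_augment_grid grid aug_level (augment_grid grid aug_level)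

-- ===== LEMMAS AND PROOFS =====

theorem getD_map_range {α : Type} (n : Nat) (F : Nat → α) (i : Nat) (d : α) (hi : i < n) :
    ((List.range n).map F).getD i d = F i := by
  simp [List.getD_eq_getElem?_getD, hi]

-- rotate90 applied to a grid in canonical (range-map) form.
theorem rot90_canon (m n : Nat) (hm : 0 < m) (f : Nat → Nat → Int) :
    rotate90 ((List.range m).map (fun i => (List.range n).map (f i)))
      = (List.range n).map (fun y => (List.range m).map (fun x => f (m - 1 - x) y)) := by
  unfold rotate90
  rw [getD_map_range m _ 0 [] hm]
  simp only [List.length_map, List.length_range]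
  apply List.map_congr_left
  intro y hy
  apply List.map_congr_left
  intro x _
  rw [getD_map_range m _ (m - 1 - x) [] (by omega),
      getD_map_range n _ y 0 (List.mem_range.mp hy)]

theorem rot_chain (X : List (List Int)) (h w : Nat) (hh : X.length = h)
    (hw : (X.getD 0 []).length = w) (h0 : 0 < h) (w0 : 0 < w) :
    rotate90 X = bRot90 X h w ∧
    rotate90 (rotate90 X) = bRot180 X h w ∧
    rotate90 (rotate90 (rotate90 X)) = bRot270 X h w := by
  have e1 : rotate90 X = bRot90 X h w := by
    unfold rotate90 bRot90; rw [hh, hw]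
  have e2 : rotate90 (rotate90 X) = bRot180 X h w := by
    rw [e1]
    unfold bRot90
    rw [rot90_canon w h w0 (fun i x => (X.getD (h - 1 - x) []).getD i 0)]
    rfl
  refine ⟨e1, e2, ?_⟩
  rw [e2]
  unfold bRot180
  rw [rot90_canon h w h0 (fun i j => (X.getD (h - 1 - i) []).getD (w - 1 - j) 0)]
  unfold bRot270
  apply List.map_congr_left
  intro y _
  apply List.map_congr_left
  intro x hx
  have : h - 1 - (h - 1 - x) = x := by
    have := List.mem_range.mp hx; omega
  rw [this]

-- ===== VERDICT (by name: the statement is the Claim_ definition above) =====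

theorem augment_grid_spec : Claim_equal_augment_grid := by
  intro grid aug_level _ hPre
  obtain ⟨hne, hfr, _⟩ := hPre
  unfold Spec_augment_grid
  have h0 : 0 < grid.length := List.length_pos_iff.mpr hne
  have w0 : 0 < (grid.getD 0 []).length := List.length_pos_iff.mpr hfr
  obtain ⟨g1, g2, g3⟩ := rot_chain grid grid.length (grid.getD 0 []).length rfl rfl h0 w0
  have fl0 : (grid.map List.reverse).getD 0 [] = (grid.getD 0 []).reverse := by
    rcases grid with _ | ⟨r, rs⟩
    · simp at h0
    · simp [List.getD]
  obtain ⟨f1, f2, f3⟩ := rot_chain (grid.map List.reverse) grid.length (grid.getD 0 []).length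
    (by simp) (by rw [fl0]; simp) h0 w0
  unfold augment_grid augment_grid_alt
  by_cases hc : 8 ≤ aug_level
  · simp only [hc, if_true]
    rw [g3, g2, g1, f3, f2, f1]
  · simp only [hc, if_false]
    rw [g3, g2, g1]
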